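-- pv_equiv track=rewrite | github.com/Nundur/negnox | Components.py | parancsDarabolas
-- ===== SOURCE A (Python) =====
-- def parancsDarabolas(asd):
--     daraboltSz = asd.split(" ")
--     daraboltSzoveg = []
--
--     szamlalo = 0
--     for szoveg in daraboltSz:
--         szamlalo+=1
--         if szamlalo == 1:
--             continue
--         else :
--             daraboltSzoveg.append(szoveg)
--     returner = ""
--     szamlalo = 0
--     for asd in daraboltSzoveg:
--         szamlalo+=1
--         returner+=asd
--
--         if szamlalo != len(daraboltSzoveg):
--             returner+=" "
--     return returner
-- ===== SOURCE B (Python) =====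
-- def parancsDarabolas(asd):
--     return asd.partition(" ")[2]
-- ===== Notes on version B (the rewrite author's own statement) =====
-- stated objective: simpler
-- what changed: Replaces split-into-list plus a skip-first loop plus a manual rejoin-with-separator loop by a single first-separator scan (str.partition), returning everything after the first space directly.
import Mathlib
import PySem

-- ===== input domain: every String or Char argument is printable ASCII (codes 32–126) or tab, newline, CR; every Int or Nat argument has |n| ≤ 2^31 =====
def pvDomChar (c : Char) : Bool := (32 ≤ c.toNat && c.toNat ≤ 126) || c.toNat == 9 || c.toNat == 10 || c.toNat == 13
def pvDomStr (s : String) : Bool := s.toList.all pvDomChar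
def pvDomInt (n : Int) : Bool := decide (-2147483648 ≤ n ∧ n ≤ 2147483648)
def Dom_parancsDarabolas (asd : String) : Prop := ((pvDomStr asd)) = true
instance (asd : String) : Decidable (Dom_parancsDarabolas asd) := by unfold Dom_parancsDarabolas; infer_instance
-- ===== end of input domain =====

-- B replaces A's split / skip-first loop / manual rejoin loop by a single first-separator
-- scan (str.partition(" ")[2]); objective: simpler, same cost.

-- ===== PORT A =====
-- body of A's first for-loop (counter, skip the element with counter 1)
def pvLoop1Step (st : Nat × List (List Char)) (szoveg : List Char) : Nat × List (List Char) :=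
  let szamlalo := st.1 + 1
  if szamlalo = 1 then (szamlalo, st.2) else (szamlalo, st.2 ++ [szoveg])

-- body of A's second for-loop (append word, then a space unless the counter hit len)
def pvLoop2Step (L : Nat) (st : Nat × List Char) (a : List Char) : Nat × List Char :=
  let szamlalo := st.1 + 1
  let returner := st.2 ++ a
  if szamlalo ≠ L then (szamlalo, returner ++ [' ']) else (szamlalo, returner)

def parancsDarabolas (asd : String) : String :=
  let daraboltSz : List (List Char) := PySem.Chars.splitOn asd.toList [' ']   -- asd.split(" ")
  let daraboltSzoveg := (daraboltSz.foldl pvLoop1Step (0, [])).2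
  let p2 := daraboltSzoveg.foldl (pvLoop2Step daraboltSzoveg.length) (0, [])
  String.ofList p2.2

-- ===== PORT B =====
-- hand port of str.partition(" ")[2] for the single-character separator " ": scan to the
-- first space, return everything after it ([] when there is none) — exact on all strings
def pvPartitionAfterSpace : List Char → List Char
  | [] => []
  | c :: r => if c = ' ' then r else pvPartitionAfterSpace r

def parancsDarabolas_alt (asd : String) : String :=
  String.ofList (pvPartitionAfterSpace asd.toList)

-- ===== PRECONDITION & SPEC =====
def Spec_parancsDarabolas (asd : String) (out : String) : Prop := out = parancsDarabolas_alt asd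
instance (asd : String) (out : String) : Decidable (Spec_parancsDarabolas asd out) := by unfold Spec_parancsDarabolas; infer_instance

-- ===== CLAIM (what is proved, stated in full; the proofs are below) =====
def Claim_equal_parancsDarabolas : Prop := ∀ (asd : String), Dom_parancsDarabolas asd → Spec_parancsDarabolas asd (parancsDarabolas asd)

-- ===== LEMMAS AND PROOFS =====

-- structural characterisation of PySem.Chars.splitOn with the one-char separator [' ']
def pvSplit : List Char → List Char → List (List Char)
  | pre, [] => [pre]
  | pre, c :: r => if c = ' ' then pre :: pvSplit [] r else pvSplit (pre ++ [c]) r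

theorem pvGo_nil (fuel : Nat) (cur : List Char) (acc : List (List Char)) :
    PySem.Chars.splitOn.go [' '] (fuel + 1) [] cur acc = (cur.reverse :: acc).reverse := by
  simp [PySem.Chars.splitOn.go]

theorem pvGo_cons (fuel : Nat) (c : Char) (rest cur : List Char) (acc : List (List Char)) :
    PySem.Chars.splitOn.go [' '] (fuel + 1) (c :: rest) cur acc =
      if c = ' ' then PySem.Chars.splitOn.go [' '] fuel rest [] (cur.reverse :: acc)
      else PySem.Chars.splitOn.go [' '] fuel rest (c :: cur) acc := by
  by_cases h : c = ' ' <;> simp [PySem.Chars.splitOn.go, List.isPrefixOf, h]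
  intro h'
  exact absurd h'.symm h

theorem pvGo_spec (cs : List Char) : ∀ (fuel : Nat) (cur : List Char) (acc : List (List Char)),
    cs.length < fuel →
    PySem.Chars.splitOn.go [' '] fuel cs cur acc = acc.reverse ++ pvSplit cur.reverse cs := by
  induction cs with
  | nil =>
    intro fuel cur acc h
    obtain ⟨f, rfl⟩ : ∃ f, fuel = f + 1 := ⟨fuel - 1, by omega⟩
    simp [pvGo_nil, pvSplit]
  | cons c rest ih =>
    intro fuel cur acc h
    obtain ⟨f, rfl⟩ : ∃ f, fuel = f + 1 := ⟨fuel - 1, by omega⟩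
    rw [pvGo_cons]
    by_cases hc : c = ' '
    · rw [if_pos hc, ih f [] (cur.reverse :: acc) (by simp at h; omega)]
      simp [pvSplit, hc]
    · rw [if_neg hc, ih f (c :: cur) acc (by simp at h; omega)]
      simp [pvSplit, hc]

theorem pvSplitOn_eq (cs : List Char) : PySem.Chars.splitOn cs [' '] = pvSplit [] cs := by
  unfold PySem.Chars.splitOn
  rw [pvGo_spec cs (cs.length + 1) [] [] (by omega)]
  rfl

-- A's first loop keeps exactly the tail of the split list
theorem pvLoop1_ge1 (l : List (List Char)) : ∀ (k : Nat) (acc : List (List Char)), 1 ≤ k →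
    (l.foldl pvLoop1Step (k, acc)).2 = acc ++ l := by
  induction l with
  | nil => intro k acc _; simp
  | cons x xs ih =>
    intro k acc hk
    rw [List.foldl_cons, show pvLoop1Step (k, acc) x = (k + 1, acc ++ [x]) by
      simp [pvLoop1Step]; omega]
    rw [ih (k + 1) (acc ++ [x]) (by omega)]
    simp

theorem pvLoop1_eq_tail (l : List (List Char)) :
    (l.foldl pvLoop1Step (0, [])).2 = l.tail := by
  cases l with
  | nil => simp
  | cons x xs =>
    rw [List.foldl_cons, show pvLoop1Step (0, []) x = (1, []) by simp [pvLoop1Step]]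
    simpa using pvLoop1_ge1 xs 1 [] (by omega)

theorem pvIntercalate_cons_ne_nil (sep x : List Char) (xs : List (List Char)) (h : xs ≠ []) :
    List.intercalate sep (x :: xs) = x ++ sep ++ List.intercalate sep xs := by
  cases xs with
  | nil => exact absurd rfl h
  | cons y ys => simp [List.intercalate, List.intersperse]

-- A's second loop is exactly intercalation with " "
theorem pvLoop2_gen (L : Nat) (l : List (List Char)) : ∀ (k : Nat) (r : List Char),
    L = k + l.length →
    (l.foldl (pvLoop2Step L) (k, r)).2 = r ++ List.intercalate [' '] l := by
  induction l with
  | nil => intro k r _; simp [List.intercalate]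
  | cons x xs ih =>
    intro k r hL
    rw [List.foldl_cons]
    by_cases hx : xs = []
    · subst hx
      rw [show pvLoop2Step L (k, r) x = (k + 1, r ++ x) by
        simp [pvLoop2Step]; simp at hL; omega]
      simp [List.intercalate]
    · have hxs : xs.length ≠ 0 := by simpa using hx
      rw [show pvLoop2Step L (k, r) x = (k + 1, r ++ x ++ [' ']) by
        simp [pvLoop2Step]; simp at hL; omega]
      rw [ih (k + 1) (r ++ x ++ [' ']) (by simp at hL ⊢; omega)]
      rw [pvIntercalate_cons_ne_nil [' '] x xs hx]
      simp

theorem pvSplit_ne_nil (cs pre : List Char) : pvSplit pre cs ≠ [] := by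
  induction cs generalizing pre with
  | nil => simp [pvSplit]
  | cons c r ih =>
    by_cases hc : c = ' ' <;> simp [pvSplit, hc]
    exact ih _

theorem pvJoin_pvSplit (cs : List Char) : ∀ (pre : List Char),
    List.intercalate [' '] (pvSplit pre cs) = pre ++ cs := by
  induction cs with
  | nil => intro pre; simp [pvSplit, List.intercalate]
  | cons c r ih =>
    intro pre
    by_cases hc : c = ' '
    · rw [pvSplit, if_pos hc,
        pvIntercalate_cons_ne_nil [' '] pre (pvSplit [] r) (pvSplit_ne_nil r []), ih []]
      simp [hc]
    · rw [pvSplit, if_neg hc, ih (pre ++ [c])]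
      simp

-- joining the tail of the split is exactly "everything after the first space"
theorem pvTail_join (cs : List Char) : ∀ (pre : List Char),
    List.intercalate [' '] (pvSplit pre cs).tail = pvPartitionAfterSpace cs := by
  induction cs with
  | nil => intro pre; simp [pvSplit, List.intercalate, pvPartitionAfterSpace]
  | cons c r ih =>
    intro pre
    by_cases hc : c = ' '
    · rw [pvSplit, if_pos hc]
      simp only [List.tail_cons, pvPartitionAfterSpace, hc, if_pos]
      simpa using pvJoin_pvSplit r []
    · rw [pvSplit, if_neg hc, ih (pre ++ [c])]
      simp [pvPartitionAfterSpace, hc]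

-- ===== VERDICT (by name: the statement is the Claim_ definition above) =====
theorem parancsDarabolas_spec : Claim_equal_parancsDarabolas := by
  intro asd _
  unfold Spec_parancsDarabolas parancsDarabolas parancsDarabolas_alt
  simp only [pvSplitOn_eq, pvLoop1_eq_tail]
  rw [pvLoop2_gen ((pvSplit [] asd.toList).tail.length) _ 0 [] (by simp)]
  rw [pvTail_join asd.toList []]
  simp
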